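-- pv_equiv track=rewrite | github.com/aimldlnlp/geometric-industrial-reconstruction | recon/make_figures.py | _select_family_representatives
-- ===== SOURCE A (Python) =====
-- FAMILY_ORDER = {
--     "flange": 0,
--     "shaft": 1,
--     "bracket": 2,
--     "pipe_elbow": 3,
--     "plate_with_holes": 4,
-- }
--
-- def _select_family_representatives(records: list[dict], split: str | None, max_items: int = 5) -> list[dict]:
--     filtered = [record for record in records if split is None or record.get("split") == split]
--     if not filtered:
--         filtered = list(records)
--     representatives: dict[str, dict] = {}
--     ordered = sorted(
--         filtered,
--         key=lambda record: (
--             FAMILY_ORDER.get(record.get("family", ""), 99),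
--             str(record.get("scan_id", "")),
--         ),
--     )
--     for record in ordered:
--         representatives.setdefault(str(record.get("family", "")), record)
--     return list(representatives.values())[:max_items]
-- ===== SOURCE B (Python) =====
-- FAMILY_ORDER = {
--     "flange": 0,
--     "shaft": 1,
--     "bracket": 2,
--     "pipe_elbow": 3,
--     "plate_with_holes": 4,
-- }
--
-- def _select_family_representatives(records: list, split=None, max_items: int = 5) -> list:
--     pool = [r for r in records if split is None or r.get("split") == split] or list(records)
--     # distinct families in first-seen order
--     fams = []
--     for r in pool:
--         f = str(r.get("family", ""))
--         if f not in fams: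
--             fams.append(f)
--     # per family, the record with the minimal (rank, scan_id, index) key; indices are
--     # distinct, so min never compares the records themselves
--     keyed = [
--         min(
--             ((FAMILY_ORDER.get(r.get("family", ""), 99), str(r.get("scan_id", "")), i), r)
--             for i, r in enumerate(pool)
--             if str(r.get("family", "")) == f
--         )
--         for f in fams
--     ]
--     keyed.sort(key=lambda entry: entry[0])
--     return [r for _, r in keyed[:max_items]]
-- ===== Notes on version B (the rewrite author's own statement) =====
-- stated objective: alternative
-- what changed: A sorts all n records by (family rank, scan_id) and setdefault-scans the sorted list to keep the first record per family; B never sorts the records: it collects the distinct families in first-seen order, takes per family the minimum-(rank, scan_id, index) record with min(), and sorts only the k family representatives.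
import Mathlib
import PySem

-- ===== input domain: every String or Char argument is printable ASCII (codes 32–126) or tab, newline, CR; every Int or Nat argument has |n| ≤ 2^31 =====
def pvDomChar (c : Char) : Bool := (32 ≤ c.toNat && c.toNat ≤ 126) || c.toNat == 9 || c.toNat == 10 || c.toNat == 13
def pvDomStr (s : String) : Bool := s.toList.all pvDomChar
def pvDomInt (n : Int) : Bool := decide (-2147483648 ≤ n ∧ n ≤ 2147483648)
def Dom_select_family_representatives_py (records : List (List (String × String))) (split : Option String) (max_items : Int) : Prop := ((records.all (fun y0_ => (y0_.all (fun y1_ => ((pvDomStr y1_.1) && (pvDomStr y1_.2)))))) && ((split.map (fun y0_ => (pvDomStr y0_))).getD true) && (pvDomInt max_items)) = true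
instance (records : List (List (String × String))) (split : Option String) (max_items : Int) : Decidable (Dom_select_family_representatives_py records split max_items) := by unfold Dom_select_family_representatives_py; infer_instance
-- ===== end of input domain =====

-- B replaces "sort all n records by (family rank, scan_id), then keep the first record of each
-- family" by: collect the distinct families in first-seen order, take per family the record with
-- the minimal (rank, scan_id, index) key with min(), and sort only the k family representatives.

-- ===== PORT A =====
def pvFamilyOrder : PySem.Dict String Int :=
  PySem.Dict.mk [("flange", 0), ("shaft", 1), ("bracket", 2), ("pipe_elbow", 3), ("plate_with_holes", 4)]

-- record.get(k, dflt) on the association-list record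
def pvRecGetD (r : List (String × String)) (k dflt : String) : String := (PySem.Dict.mk r).getD k dflt

-- str(record.get("family", "")) (str() of a str is the identity)
def pvFam (r : List (String × String)) : String := pvRecGetD r "family" ""
-- FAMILY_ORDER.get(record.get("family", ""), 99)
def pvK1 (r : List (String × String)) : Int := pvFamilyOrder.getD (pvFam r) 99
-- str(record.get("scan_id", ""))
def pvK2 (r : List (String × String)) : String := pvRecGetD r "scan_id" ""

-- split is None or record.get("split") == split
def pvKeep (split : Option String) (r : List (String × String)) : Bool :=
  match split with
  | none => true
  | some s => (PySem.Dict.mk r).get? "split" == some s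

def pvPool (records : List (List (String × String))) (split : Option String) : List (List (String × String)) :=
  let filtered := records.filter (pvKeep split)
  if filtered.isEmpty then records else filtered

def select_family_representatives_py (records : List (List (String × String))) (split : Option String) (max_items : Int) : List (List (String × String)) :=
  let filtered := pvPool records split
  let ordered := PySem.List.sorted2 filtered pvK1 pvK2
  let reps := ordered.foldl (fun d r => d.setdefault (pvFam r) r) (PySem.Dict.empty : PySem.Dict String (List (String × String)))
  PySem.List.slice reps.values none (some max_items)

-- ===== PORT B =====
-- FAMILY_ORDER.get(f, 99)
def altOrd (f : String) : Int :=
  (PySem.Dict.mk [("flange", (0 : Int)), ("shaft", 1), ("bracket", 2), ("pipe_elbow", 3), ("plate_with_holes", 4)]).getD f 99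

-- str(r.get("family", ""))
def altFam (r : List (String × String)) : String := (PySem.Dict.mk r).getD "family" ""

-- the pair ((rank, scan_id, index), record) built inside B's min(...) generator
def altEntry (i : Int) (r : List (String × String)) : (Int × String × Int) × List (String × String) :=
  ((altOrd ((PySem.Dict.mk r).getD "family" ""), (PySem.Dict.mk r).getD "scan_id" "", i), r)

-- Python's lexicographic order on the (Int, String, Int) key triple
def altLex (t : Int × String × Int) : Lex (Int × Lex (String × Int)) := toLex (t.1, toLex (t.2.1, t.2.2))

def select_family_representatives_py_alt (records : List (List (String × String))) (split : Option String) (max_items : Int) : List (List (String × String)) :=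
  let pool := match records.filter (fun r => split.elim true (fun s => (PySem.Dict.mk r).get? "split" == some s)) with
    | [] => records
    | l => l
  -- distinct families in first-seen order
  let fams := pool.foldl (fun fs r => if altFam r ∈ fs then fs else fs ++ [altFam r]) ([] : List String)
  -- min() over a generator that is nonempty for every f in fams; the indices i are distinct,
  -- so Python's min compares only the key triples (exact: the record is never compared)
  let keyed := fams.map (fun f =>
    (PySem.List.min?
      (((PySem.List.enumerate pool 0).filter (fun p => altFam p.2 == f)).map (fun p => altEntry p.1 p.2))
      (fun e => altLex e.1)).getD ((0, "", 0), []))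
  let chosen := PySem.List.sorted keyed (fun e => altLex e.1)
  (PySem.List.slice chosen none (some max_items)).map (fun e => e.2)

-- ===== PRECONDITION & SPEC =====
def Spec_select_family_representatives_py (records : List (List (String × String))) (split : Option String) (max_items : Int) (out : List (List (String × String))) : Prop := out = select_family_representatives_py_alt records split max_items
instance (records : List (List (String × String))) (split : Option String) (max_items : Int) (out : List (List (String × String))) : Decidable (Spec_select_family_representatives_py records split max_items out) := by unfold Spec_select_family_representatives_py; infer_instance

-- ===== CLAIM (what is proved, stated in full; the proofs are below) =====
def Claim_equal_select_family_representatives_py : Prop := ∀ (records : List (List (String × String))) (split : Option String) (max_items : Int), Dom_select_family_representatives_py records split max_items → Spec_select_family_representatives_py records split max_items (select_family_representatives_py records split max_items)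

-- ===== LEMMAS AND PROOFS =====

def pvLex (a : Int × String × Nat) : Lex (Int × Lex (String × Nat)) := toLex (a.1, toLex (a.2.1, a.2.2))

def pvKeyI (p : List (String × String) × Nat) : Lex (Int × Lex (String × Nat)) := pvLex (pvK1 p.1, pvK2 p.1, p.2)

def gB (q : List (String × String) × Nat) : (Int × String × Int) × List (String × String) := altEntry (q.2 : Int) q.1

lemma gB_eq (q : List (String × String) × Nat) : gB q = ((pvK1 q.1, pvK2 q.1, (q.2 : Int)), q.1) := rfl

lemma key_lt_iff (p q : List (String × String) × Nat) :
    altLex (gB p).1 < altLex (gB q).1 ↔ pvKeyI p < pvKeyI q := by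
  simp only [gB_eq, altLex, pvKeyI, pvLex, Prod.Lex.toLex_lt_toLex, Nat.cast_lt]

lemma key_le_iff (p q : List (String × String) × Nat) :
    altLex (gB p).1 ≤ altLex (gB q).1 ↔ pvKeyI p ≤ pvKeyI q := by
  rw [← not_lt, ← not_lt, key_lt_iff]

lemma key_eq_iff (p q : List (String × String) × Nat) :
    altLex (gB p).1 = altLex (gB q).1 ↔ pvKeyI p = pvKeyI q := by
  rw [le_antisymm_iff, le_antisymm_iff, key_le_iff, key_le_iff]

def keepFirst {β : Type} (f : β → String) : List β → List String → List β
  | [], _ => []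
  | r :: t, seen => if f r ∈ seen then keepFirst f t seen else r :: keepFirst f t (f r :: seen)

lemma keepFirst_congr {β : Type} (f : β → String) (l : List β) :
    ∀ {s s' : List String}, (∀ a, a ∈ s ↔ a ∈ s') → keepFirst f l s = keepFirst f l s' := by
  induction l with
  | nil => intro s s' h; rfl
  | cons r t ih =>
    intro s s' h
    simp only [keepFirst]
    by_cases hm : f r ∈ s
    · rw [if_pos hm, if_pos ((h _).mp hm), ih h]
    · rw [if_neg hm, if_neg (fun c => hm ((h _).mpr c))]
      rw [ih (s := f r :: s) (s' := f r :: s') (fun a => by simp [h a])]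

lemma keepFirst_map {β γ : Type} (f : γ → String) (g : β → γ) (l : List β) :
    ∀ s, keepFirst f (l.map g) s = (keepFirst (fun b => f (g b)) l s).map g := by
  induction l with
  | nil => intro s; rfl
  | cons r t ih => intro s; simp only [List.map, keepFirst]; split <;> simp [ih]

lemma keepFirst_sublist {β : Type} (f : β → String) (l : List β) :
    ∀ s, (keepFirst f l s).Sublist l := by
  induction l with
  | nil => intro s; simp [keepFirst]
  | cons r t ih =>
    intro s; simp only [keepFirst]; split
    · exact (ih s).cons r
    · exact (ih _).cons₂ r

lemma keepFirst_seen {β : Type} (f : β → String) (l : List β) :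
    ∀ s, ∀ x ∈ keepFirst f l s, f x ∉ s := by
  induction l with
  | nil => intro s x hx; simp [keepFirst] at hx
  | cons r t ih =>
    intro s x hx
    simp only [keepFirst] at hx
    split at hx
    · exact ih s x hx
    · rcases List.mem_cons.mp hx with rfl | hx
      · assumption
      · exact fun c => ih _ x hx (List.mem_cons_of_mem _ c)

lemma keepFirst_map_nodup {β : Type} (f : β → String) (l : List β) :
    ∀ s, ((keepFirst f l s).map f).Nodup := by
  induction l with
  | nil => intro s; simp [keepFirst]
  | cons r t ih =>
    intro s
    simp only [keepFirst]
    split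
    · exact ih s
    · rw [List.map_cons, List.nodup_cons]
      refine ⟨fun hc => ?_, ih _⟩
      obtain ⟨x, hx, hfx⟩ := List.mem_map.mp hc
      exact keepFirst_seen f t (f r :: s) x hx (hfx ▸ List.mem_cons_self)

lemma keepFirst_map_mem {β : Type} (f : β → String) (l : List β) :
    ∀ s a, a ∈ (keepFirst f l s).map f ↔ a ∈ l.map f ∧ a ∉ s := by
  induction l with
  | nil => intro s a; simp [keepFirst]
  | cons r t ih =>
    intro s a
    simp only [keepFirst]
    by_cases hm : f r ∈ s
    · rw [if_pos hm, ih, List.map_cons, List.mem_cons]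
      constructor
      · rintro ⟨h1, h2⟩; exact ⟨Or.inr h1, h2⟩
      · rintro ⟨h1 | h1, h2⟩
        · exact absurd (h1 ▸ hm) h2
        · exact ⟨h1, h2⟩
    · rw [if_neg hm, List.map_cons, List.map_cons, List.mem_cons, List.mem_cons, ih]
      constructor
      · rintro (rfl | ⟨h1, h2⟩)
        · exact ⟨Or.inl rfl, hm⟩
        · exact ⟨Or.inr h1, fun c => h2 (List.mem_cons_of_mem _ c)⟩
      · rintro ⟨h1 | h1, h2⟩
        · exact Or.inl h1
        · by_cases hr : a = f r
          · exact Or.inl hr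
          · exact Or.inr ⟨h1, by simp [hr, h2]⟩

lemma keepFirst_min {β : Type} (f : β → String) {κ : Type} [LinearOrder κ] (K : β → κ) (l : List β)
    (hpw : l.Pairwise (fun a b => K a < K b)) :
    ∀ s, ∀ x ∈ keepFirst f l s, ∀ y ∈ l, f y = f x → K x ≤ K y := by
  induction l with
  | nil => intro s x hx; simp [keepFirst] at hx
  | cons r t ih =>
    rcases List.pairwise_cons.mp hpw with ⟨hr, hpw'⟩
    intro s x hx y hy hf
    simp only [keepFirst] at hx
    split at hx
    · rcases List.mem_cons.mp hy with rfl | hy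
      · exact absurd (hf ▸ ‹f y ∈ s›) (keepFirst_seen f t s x hx)
      · exact ih hpw' s x hx y hy hf
    · rcases List.mem_cons.mp hx with rfl | hx
      · rcases List.mem_cons.mp hy with rfl | hy
        · exact le_refl _
        · exact (hr y hy).le
      · rcases List.mem_cons.mp hy with rfl | hy
        · have := keepFirst_seen f t (f y :: s) x hx
          exact absurd (hf ▸ List.mem_cons_self) this
        · exact ih hpw' _ x hx y hy hf

lemma foldG {β γ : Type} (f : β → String) (g : β → γ) (l : List β) :
    ∀ d : PySem.Dict String γ,
      (l.foldl (fun d r => if d.contains (f r) then d else d.insert (f r) (g r)) d).items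
        = d.items ++ (keepFirst f l d.keys).map (fun r => (f r, g r)) := by
  induction l with
  | nil => intro d; simp [keepFirst]
  | cons r t ih =>
    intro d
    simp only [List.foldl, keepFirst]
    by_cases hc : d.contains (f r) = true
    · rw [if_pos hc, if_pos ((PySem.Dict.contains_iff_mem_keys d (f r)).mp hc), ih]
    · have hc' : d.contains (f r) = false := by simpa using hc
      rw [if_neg hc, if_neg (fun c => by simp [(PySem.Dict.contains_iff_mem_keys d (f r)).mpr c] at hc'), ih]
      rw [PySem.Dict.items_insert_of_not_contains _ _ hc']
      rw [PySem.Dict.keys_insert_of_not_contains _ _ hc']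
      rw [keepFirst_congr f t (s := d.keys ++ [f r]) (s' := f r :: d.keys) (by intro a; simp; tauto)]
      simp

lemma setdefault_fold_values (l : List (List (String × String))) :
    (l.foldl (fun d r => d.setdefault (pvFam r) r) (PySem.Dict.empty : PySem.Dict String (List (String × String)))).values
      = keepFirst pvFam l [] := by
  have hf : (fun (d : PySem.Dict String (List (String × String))) r => d.setdefault (pvFam r) r)
      = fun d r => if d.contains (pvFam r) then d else d.insert (pvFam r) r := by
    funext d r
    by_cases hc : d.contains (pvFam r) = true
    · rw [if_pos hc, PySem.Dict.setdefault_of_contains _ _ hc]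
    · have hc' : d.contains (pvFam r) = false := by simpa using hc
      rw [if_neg hc, PySem.Dict.setdefault_of_not_contains _ _ hc']
  rw [hf]
  have := foldG pvFam (fun r => r) l PySem.Dict.empty
  simp only [PySem.Dict.values, this, PySem.Dict.keys]
  simp [PySem.Dict.empty, Function.comp_def]

lemma insertBy_map_fst (x : List (String × String)) (n : Nat) (acc : List ((List (String × String)) × Nat))
    (h : ∀ p ∈ acc, p.2 < n) :
    (PySem.List.insertBy (fun a b => decide (pvKeyI a < pvKeyI b)) (x, n) acc).map Prod.fst
      = PySem.List.insertBy (fun a b => decide (toLex (pvK1 a, pvK2 a) < toLex (pvK1 b, pvK2 b))) x (acc.map Prod.fst) := by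
  induction acc with
  | nil => rfl
  | cons y t ih =>
    have hy : y.2 < n := h y (by simp)
    have hb : decide (pvKeyI (x, n) < pvKeyI y) = decide (toLex (pvK1 x, pvK2 x) < toLex (pvK1 y.1, pvK2 y.1)) := by
      have hnj : ¬ (n < y.2) := by omega
      simp only [pvKeyI, pvLex, decide_eq_decide, Prod.Lex.toLex_lt_toLex, hnj]
      tauto
    simp only [PySem.List.insertBy, List.map, hb]
    split
    · simp
    · simp only [List.map]
      rw [ih (fun p hp => h p (by simp [hp]))]

lemma sorted_zipIdx_fold (xs : List (List (String × String))) :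
    ∀ (n : Nat) (acc : List ((List (String × String)) × Nat)), (∀ p ∈ acc, p.2 < n) →
      ((xs.zipIdx n).foldl (fun acc x => PySem.List.insertBy (fun a b => decide (pvKeyI a < pvKeyI b)) x acc) acc).map Prod.fst
        = xs.foldl (fun acc x => PySem.List.insertBy (fun a b => decide (toLex (pvK1 a, pvK2 a) < toLex (pvK1 b, pvK2 b))) x acc) (acc.map Prod.fst) := by
  induction xs with
  | nil => intro n acc h; rfl
  | cons x t ih =>
    intro n acc h
    rw [List.zipIdx_cons]
    simp only [List.foldl]
    rw [ih (n + 1) _ (fun p hp => by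
      rcases (PySem.List.mem_insertBy _ _ _ _).mp hp with h1 | h1
      · subst h1; omega
      · exact Nat.lt_succ_of_lt (h p h1))]
    rw [insertBy_map_fst x n acc h]

lemma sorted2_eq_indexed (xs : List (List (String × String))) :
    PySem.List.sorted2 xs pvK1 pvK2 = (PySem.List.sorted xs.zipIdx pvKeyI).map Prod.fst := by
  have h1 : PySem.List.sorted2 xs pvK1 pvK2
      = xs.foldl (fun acc x => PySem.List.insertBy (fun a b => decide (toLex (pvK1 a, pvK2 a) < toLex (pvK1 b, pvK2 b))) x acc) [] := by
    simp only [PySem.List.sorted2, Bool.false_eq_true, if_false]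
    congr 1
    funext acc x
    congr 1
    funext a b
    rw [Bool.eq_iff_iff]
    simp only [Bool.or_eq_true, Bool.and_eq_true, Bool.not_eq_eq_eq_not, Bool.not_true,
      decide_eq_true_eq, decide_eq_false_iff_not, Prod.Lex.toLex_lt_toLex]
    constructor
    · rintro (h | ⟨h1, h2⟩)
      · exact Or.inl h
      · rcases lt_trichotomy (pvK1 a) (pvK1 b) with h3 | h3 | h3
        · exact Or.inl h3
        · exact Or.inr ⟨h3, h2⟩
        · exact absurd h3 h1
    · rintro (h | ⟨h1, h2⟩)
      · exact Or.inl h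
      · exact Or.inr ⟨by omega, h2⟩
  have h2 := sorted_zipIdx_fold xs 0 [] (by simp)
  simp only [List.map_nil] at h2
  rw [h1, ← h2]
  simp only [PySem.List.sorted, Bool.false_eq_true, if_false]

lemma zipIdx_snd_lt (l : List (List (String × String))) : ∀ n, ∀ p ∈ l.zipIdx n, n ≤ p.2 := by
  induction l with
  | nil => simp
  | cons x t ih =>
    intro n p hp
    rw [List.zipIdx_cons] at hp
    rcases List.mem_cons.mp hp with hp | hp
    · simp [hp]
    · exact Nat.le_of_succ_le (ih (n + 1) p hp)

lemma zipIdx_keyI_nodup (l : List (List (String × String))) : ∀ n, ((l.zipIdx n).map pvKeyI).Nodup := by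
  have hsnd : ∀ n, ((l.zipIdx n).map (fun p => p.2)).Nodup := by
    induction l with
    | nil => simp
    | cons x t ih =>
      intro n
      rw [List.zipIdx_cons]
      simp only [List.map, List.nodup_cons]
      refine ⟨fun hc => ?_, ih (n + 1)⟩
      obtain ⟨p, hp, hpe⟩ := List.mem_map.mp hc
      have := zipIdx_snd_lt t (n + 1) p hp
      omega
  intro n
  have hmm : ((l.zipIdx n).map pvKeyI).map (fun x => (ofLex (ofLex x).2).2) = (l.zipIdx n).map (fun p => p.2) := by
    rw [List.map_map]; rfl
  exact List.Nodup.of_map _ (hmm.symm ▸ hsnd n)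

lemma sorted_pairwise_lt (l : List ((List (String × String)) × Nat)) (h : (l.map pvKeyI).Nodup) :
    (PySem.List.sorted l pvKeyI).Pairwise (fun a b => pvKeyI a < pvKeyI b) := by
  have hle := PySem.List.sorted_pairwise l pvKeyI
  have hperm : (PySem.List.sorted l pvKeyI).map pvKeyI |>.Perm (l.map pvKeyI) :=
    (PySem.List.sorted_perm l pvKeyI false).map pvKeyI
  have hnd : ((PySem.List.sorted l pvKeyI).map pvKeyI).Nodup := hperm.nodup_iff.mpr h
  have hne : (PySem.List.sorted l pvKeyI).Pairwise (fun a b => pvKeyI a ≠ pvKeyI b) :=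
    List.pairwise_map.mp hnd
  exact (hle.and hne).imp (fun ⟨h1, h2⟩ => lt_of_le_of_ne h1 h2)

lemma slice_map {α β : Type} (f : α → β) (l : List α) (a b : Option Int) :
    PySem.List.slice (l.map f) a b = (PySem.List.slice l a b).map f := by
  simp only [PySem.List.slice, List.length_map]
  rw [List.map_take, List.map_drop]

-- B's pool expression computes A's pvPool
lemma altPool_eq (records : List (List (String × String))) (split : Option String) :
    (match records.filter (fun r => split.elim true (fun s => (PySem.Dict.mk r).get? "split" == some s)) with
      | [] => records
      | l => l) = pvPool records split := by
  have hpred : (fun r => split.elim true (fun s => (PySem.Dict.mk r).get? "split" == some s)) = pvKeep split := by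
    funext r; cases split <;> rfl
  rw [hpred]
  unfold pvPool
  cases records.filter (pvKeep split) with
  | nil => simp
  | cons a t => simp

-- B's fams loop is the ordered dedup of the families of the pool
lemma fams_eq (P : List (List (String × String))) :
    P.foldl (fun fs r => if altFam r ∈ fs then fs else fs ++ [altFam r]) ([] : List String)
      = PySem.Set.ofList (P.map pvFam) := by
  have hstep : (fun (fs : List String) r => if altFam r ∈ fs then fs else fs ++ [altFam r])
      = fun s r => PySem.Set.add s (pvFam r) := by
    funext s r
    have : altFam r = pvFam r := rfl
    rw [this]
    simp [PySem.Set.add]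
  rw [hstep, ← PySem.Set.update_map_eq_foldl_add]
  rfl

lemma zipIdx_map_fam (l : List (List (String × String))) :
    ∀ n, (l.zipIdx n).map (fun p => pvFam p.1) = l.map pvFam := by
  induction l with
  | nil => intro n; rfl
  | cons x t ih => intro n; rw [List.zipIdx_cons, List.map_cons, List.map_cons, ih]

-- B's candidate list for family f, over the enumerated pool, rewritten over zipIdx
lemma cands_eq (P : List (List (String × String))) (f : String) :
    ((PySem.List.enumerate P 0).filter (fun p => altFam p.2 == f)).map (fun p => altEntry p.1 p.2)
      = (P.zipIdx.filter (fun q => pvFam q.1 == f)).map gB := by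
  rw [PySem.List.enumerate_eq_zipIdx_map, List.filter_map, List.map_map]
  have hpred : ((fun p : Int × List (String × String) => altFam p.2 == f) ∘ (fun p : (List (String × String)) × Nat => ((0 : Int) + (p.2 : Int), p.1)))
      = fun q => pvFam q.1 == f := by
    funext q; rfl
  rw [hpred]
  refine List.map_congr_left (fun q _ => ?_)
  show altEntry ((0 : Int) + (q.2 : Int)) q.1 = gB q
  rw [zero_add]
  rfl

-- for each element x that keepFirst keeps from the sorted list, B's min() returns exactly (key x, x)
lemma min_correct (P : List (List (String × String))) (x : (List (String × String)) × Nat)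
    (hx : x ∈ keepFirst (fun p => pvFam p.1) (PySem.List.sorted P.zipIdx pvKeyI) []) :
    PySem.List.min? ((P.zipIdx.filter (fun q => pvFam q.1 == pvFam x.1)).map gB) (fun e => altLex e.1)
      = some (gB x) := by
  set S := PySem.List.sorted P.zipIdx pvKeyI with hSdef
  have hxS : x ∈ S := (keepFirst_sublist _ S []).subset hx
  have hxE : x ∈ P.zipIdx := ((PySem.List.sorted_perm P.zipIdx pvKeyI false).mem_iff).mp hxS
  have hcx : gB x ∈ (P.zipIdx.filter (fun q => pvFam q.1 == pvFam x.1)).map gB :=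
    List.mem_map_of_mem (List.mem_filter.mpr ⟨hxE, by simp⟩)
  cases hmin : PySem.List.min? ((P.zipIdx.filter (fun q => pvFam q.1 == pvFam x.1)).map gB) (fun e => altLex e.1) with
  | none =>
    rw [PySem.List.min?_eq_none_iff] at hmin
    rw [hmin] at hcx
    exact absurd hcx (List.not_mem_nil)
  | some m =>
    have hm_mem := PySem.List.min?_mem hmin
    obtain ⟨q, hqf, hqm⟩ := List.mem_map.mp hm_mem
    obtain ⟨hqE, hqfam⟩ := List.mem_filter.mp hqf
    have hqfam' : pvFam q.1 = pvFam x.1 := by simpa using hqfam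
    have hqS : q ∈ S := ((PySem.List.sorted_perm P.zipIdx pvKeyI false).mem_iff).mpr hqE
    have h1 : altLex m.1 ≤ altLex (gB x).1 := PySem.List.min?_isMin hmin (gB x) hcx
    have hpwS : S.Pairwise (fun a b => pvKeyI a < pvKeyI b) :=
      sorted_pairwise_lt P.zipIdx (zipIdx_keyI_nodup P 0)
    have h2 : pvKeyI x ≤ pvKeyI q :=
      keepFirst_min (fun p => pvFam p.1) pvKeyI S hpwS [] x hx q hqS hqfam'
    have h3 : altLex (gB x).1 ≤ altLex (gB q).1 := (key_le_iff x q).mpr h2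
    rw [hqm] at h3
    have hkeys : altLex (gB q).1 = altLex (gB x).1 := by
      rw [hqm]
      exact le_antisymm h1 h3
    have hKeq : pvKeyI q = pvKeyI x := (key_eq_iff q x).mp hkeys
    have hqx : q = x :=
      List.inj_on_of_nodup_map (zipIdx_keyI_nodup P 0) hqE hxE hKeq
    rw [← hqm, hqx]

-- the whole agreement, for a common pool P
lemma main_pool (P : List (List (String × String))) (max_items : Int) :
    PySem.List.slice ((PySem.List.sorted2 P pvK1 pvK2).foldl (fun d r => d.setdefault (pvFam r) r) (PySem.Dict.empty : PySem.Dict String (List (String × String)))).values none (some max_items)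
      = (PySem.List.slice
          (PySem.List.sorted
            ((P.foldl (fun fs r => if altFam r ∈ fs then fs else fs ++ [altFam r]) ([] : List String)).map (fun f =>
              (PySem.List.min?
                (((PySem.List.enumerate P 0).filter (fun p => altFam p.2 == f)).map (fun p => altEntry p.1 p.2))
                (fun e => altLex e.1)).getD ((0, "", 0), [])))
            (fun e => altLex e.1))
          none (some max_items)).map (fun e => e.2) := by
  set S := PySem.List.sorted P.zipIdx pvKeyI with hSdef
  set F := keepFirst (fun p : (List (String × String)) × Nat => pvFam p.1) S [] with hFdef
  set h := fun f => (PySem.List.min? ((P.zipIdx.filter (fun q => pvFam q.1 == f)).map gB) (fun e => altLex e.1)).getD ((0, "", 0), ([] : List (String × String))) with hhdef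
  -- A's unsliced value
  have hA : ((PySem.List.sorted2 P pvK1 pvK2).foldl (fun d r => d.setdefault (pvFam r) r) (PySem.Dict.empty : PySem.Dict String (List (String × String)))).values
      = F.map Prod.fst := by
    rw [sorted2_eq_indexed P, setdefault_fold_values, ← hSdef, keepFirst_map pvFam Prod.fst S []]
  -- B's keyed list, rewritten through fams_eq and cands_eq
  have hkeyed : (P.foldl (fun fs r => if altFam r ∈ fs then fs else fs ++ [altFam r]) ([] : List String)).map (fun f =>
        (PySem.List.min?
          (((PySem.List.enumerate P 0).filter (fun p => altFam p.2 == f)).map (fun p => altEntry p.1 p.2))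
          (fun e => altLex e.1)).getD ((0, "", 0), []))
      = (PySem.Set.ofList (P.map pvFam)).map h := by
    rw [fams_eq]
    exact List.map_congr_left (fun f _ => by rw [hhdef]; simp only [cands_eq])
  -- fams is a permutation of the families of F
  have hFnodup : (F.map (fun p => pvFam p.1)).Nodup := keepFirst_map_nodup _ S []
  have hmemS : ∀ a, a ∈ S.map (fun p => pvFam p.1) ↔ a ∈ P.map pvFam := by
    intro a
    have : S.map (fun p => pvFam p.1) |>.Perm (P.zipIdx.map (fun p => pvFam p.1)) :=
      (PySem.List.sorted_perm P.zipIdx pvKeyI false).map _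
    rw [this.mem_iff, zipIdx_map_fam P 0]
  have hperm : (PySem.Set.ofList (P.map pvFam)).Perm (F.map (fun p => pvFam p.1)) := by
    rw [List.perm_ext_iff_of_nodup (PySem.Set.nodup_ofList _) hFnodup]
    intro a
    rw [PySem.Set.mem_ofList, hFdef, keepFirst_map_mem, hmemS]
    simp
  -- h recovers gB x on each family of F
  have hrecover : ∀ x ∈ F, h (pvFam x.1) = gB x := by
    intro x hx
    rw [hhdef]
    simp only [min_correct P x hx, Option.getD_some]
  have hFmap : (F.map (fun p => pvFam p.1)).map h = F.map gB := by
    rw [List.map_map]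
    exact List.map_congr_left (fun x hx => hrecover x hx)
  have hpermB : ((PySem.Set.ofList (P.map pvFam)).map h).Perm (F.map gB) := by
    rw [← hFmap]
    exact hperm.map h
  -- F.map gB is strictly increasing in the B key
  have hpwS : S.Pairwise (fun a b => pvKeyI a < pvKeyI b) :=
    sorted_pairwise_lt P.zipIdx (zipIdx_keyI_nodup P 0)
  have hpwF : (F.map gB).Pairwise (fun a b => altLex a.1 < altLex b.1) := by
    rw [List.pairwise_map]
    exact (hpwS.sublist (keepFirst_sublist _ S [])).imp (fun {a b} hab => (key_lt_iff a b).mpr hab)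
  -- hence B's sorted keyed list IS F.map gB
  have hsorted : PySem.List.sorted ((PySem.Set.ofList (P.map pvFam)).map h) (fun e => altLex e.1) = F.map gB :=
    PySem.List.sorted_eq_of_perm_of_pairwise_lt _ _ _ hpermB.symm hpwF
  rw [hA, hkeyed, hsorted, slice_map, slice_map, List.map_map]
  rfl

-- ===== VERDICT (by name: the statement is the Claim_ definition above) =====
theorem select_family_representatives_py_spec : Claim_equal_select_family_representatives_py := by
  intro records split max_items _
  unfold Spec_select_family_representatives_py select_family_representatives_py select_family_representatives_py_alt
  rw [altPool_eq records split]
  exact main_pool (pvPool records split) max_items
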